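-- pv_equiv track=rewrite | github.com/Xenrao/McreatorCreate | core/transformer.py | _sort_imports
-- ===== SOURCE A (Python) =====
-- def _sort_imports(imports):
--     imports = list(dict.fromkeys(imports))
--     groups = [
--         sorted(i for i in imports if 'com.simibubi' in i),
--         sorted(i for i in imports if i.startswith('import com.') and 'simibubi' not in i),
--         sorted(i for i in imports if 'net.neoforged' in i),
--         sorted(i for i in imports if 'net.minecraft' in i),
--         sorted(i for i in imports if 'net.mcreator' in i),
--         sorted(i for i in imports if i.startswith('import java')),
--     ]
--     result = []
--     for g in groups:
--         if g:
--             result.extend(g)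
--             result.append('')
--     if result and result[-1] == '':
--         result.pop()
--     return result
-- ===== SOURCE B (Python) =====
-- def _sort_imports(imports):
--     # Decorate-sort-emit: tag each import with its group index, sort all tagged
--     # pairs in ONE global sort, then emit, inserting a blank line whenever the
--     # group tag changes.  No per-group sorts, no trailing-separator pop.
--     imports = list(dict.fromkeys(imports))
--     preds = [
--         lambda i: 'com.simibubi' in i,
--         lambda i: i.startswith('import com.') and 'simibubi' not in i,
--         lambda i: 'net.neoforged' in i,
--         lambda i: 'net.minecraft' in i,
--         lambda i: 'net.mcreator' in i,
--         lambda i: i.startswith('import java'),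
--     ]
--     pairs = [(g, imp) for g, p in enumerate(preds) for imp in imports if p(imp)]
--     pairs.sort()
--     result = []
--     prev = None
--     for g, imp in pairs:
--         if prev is not None and g != prev:
--             result.append('')
--         result.append(imp)
--         prev = g
--     return result
-- ===== Notes on version B (the rewrite author's own statement) =====
-- stated objective: alternative
-- what changed: Replaces six per-group filter-then-sort scans joined with a trailing-separator pop by a decorate-sort-emit scheme: imports are tagged with their group index, all (group, import) pairs are put through one global lexicographic sort, and the output is emitted in a single pass that inserts a blank line whenever the group tag changes.
import Mathlib
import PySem

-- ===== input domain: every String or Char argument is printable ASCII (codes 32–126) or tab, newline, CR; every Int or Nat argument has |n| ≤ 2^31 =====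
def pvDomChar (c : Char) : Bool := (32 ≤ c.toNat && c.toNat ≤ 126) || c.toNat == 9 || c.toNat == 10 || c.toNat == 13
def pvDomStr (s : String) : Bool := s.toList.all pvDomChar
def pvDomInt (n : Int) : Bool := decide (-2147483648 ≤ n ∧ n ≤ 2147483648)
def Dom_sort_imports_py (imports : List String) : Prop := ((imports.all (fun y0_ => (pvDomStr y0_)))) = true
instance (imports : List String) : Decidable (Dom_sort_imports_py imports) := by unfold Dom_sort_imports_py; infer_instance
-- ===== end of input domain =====

-- B re-derives the same grouping by decorate-sort-emit: tag each import with its group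
-- index, sort all tagged pairs once globally, and emit with a blank line on tag change;
-- an alternative decomposition, same observable result.

-- the six group predicates of the Python source (shared vocabulary of both ports)
def pvP1 (i : String) : Bool := PySem.Str.isIn "com.simibubi" i
def pvP2 (i : String) : Bool := PySem.Str.startswith i "import com." && !(PySem.Str.isIn "simibubi" i)
def pvP3 (i : String) : Bool := PySem.Str.isIn "net.neoforged" i
def pvP4 (i : String) : Bool := PySem.Str.isIn "net.minecraft" i
def pvP5 (i : String) : Bool := PySem.Str.isIn "net.mcreator" i
def pvP6 (i : String) : Bool := PySem.Str.startswith i "import java"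

-- ===== PORT A =====
def sort_imports_py (imports : List String) : List String :=
  let ds := PySem.List.dedup imports           -- list(dict.fromkeys(imports))
  let groups : List (List String) :=
    [ PySem.List.sorted (ds.filter pvP1) (fun x => x) false,
      PySem.List.sorted (ds.filter pvP2) (fun x => x) false,
      PySem.List.sorted (ds.filter pvP3) (fun x => x) false,
      PySem.List.sorted (ds.filter pvP4) (fun x => x) false,
      PySem.List.sorted (ds.filter pvP5) (fun x => x) false,
      PySem.List.sorted (ds.filter pvP6) (fun x => x) false ]
  let result := groups.foldl (fun acc g => if g ≠ [] then acc ++ g ++ [""] else acc) []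
  if result ≠ [] ∧ result.getLast? = some "" then result.dropLast else result

-- ===== PORT B =====
-- list(enumerate(preds)) of Source B, written out (the predicate list is a literal)
def pvTagged : List (Nat × (String → Bool)) :=
  [(0, pvP1), (1, pvP2), (2, pvP3), (3, pvP4), (4, pvP5), (5, pvP6)]

-- loop body: "if prev is not None and g != prev: result.append(''); result.append(imp); prev = g"
def pvStep (st : List String × Option Nat) (p : Nat × String) : List String × Option Nat :=
  ((if st.2.isSome ∧ st.2 ≠ some p.1 then st.1 ++ [""] else st.1) ++ [p.2], some p.1)

def sort_imports_py_alt (imports : List String) : List String :=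
  let ds := PySem.List.dedup imports           -- list(dict.fromkeys(imports))
  -- [(g, imp) for g, p in enumerate(preds) for imp in imports if p(imp)]
  let pairs : List (Nat × String) :=
    pvTagged.flatMap (fun gp => (ds.filter gp.2).map (fun imp => (gp.1, imp)))
  -- pairs.sort(): Python's lexicographic tuple sort = sorted2 with the two components as keys
  let sp := PySem.List.sorted2 pairs (fun p => p.1) (fun p => p.2) false
  (sp.foldl pvStep ([], none)).1

-- ===== PRECONDITION & SPEC =====
def Spec_sort_imports_py (imports : List String) (out : List String) : Prop := out = sort_imports_py_alt imports
instance (imports : List String) (out : List String) : Decidable (Spec_sort_imports_py imports out) := by unfold Spec_sort_imports_py; infer_instance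

-- ===== CLAIM (what is proved, stated in full; the proofs are below) =====
def Claim_equal_sort_imports_py : Prop := ∀ (imports : List String), Dom_sort_imports_py imports → Spec_sort_imports_py imports (sort_imports_py imports)

-- ===== LEMMAS AND PROOFS =====

-- nonempty blocks joined by one blank separator (the common value both ports compute)
def pvJoin : List (List String) → List String
  | [] => []
  | h :: t => h ++ t.flatMap (fun b => "" :: b)

-- ---- A-side characterisation ----

theorem pvAFold (bs : List (List String)) (acc : List String) :
    bs.foldl (fun acc g => if g ≠ [] then acc ++ g ++ [""] else acc) acc
      = acc ++ (bs.filter (fun g => !g.isEmpty)).flatMap (fun b => b ++ [""]) := by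
  induction bs generalizing acc with
  | nil => simp
  | cons h t ih =>
    cases h with
    | nil => simpa using ih acc
    | cons x xs =>
      rw [List.foldl_cons, if_pos (by simp), ih]
      simp [List.append_assoc]

theorem pvShift (t : List (List String)) :
    "" :: t.flatMap (fun b => b ++ [""]) = t.flatMap (fun b => "" :: b) ++ [""] := by
  induction t with
  | nil => rfl
  | cons h t ih => simp [← ih]

theorem pvFlatJoin (nbs : List (List String)) (h : nbs ≠ []) :
    nbs.flatMap (fun b => b ++ [""]) = pvJoin nbs ++ [""] := by
  cases nbs with
  | nil => exact absurd rfl h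
  | cons b t => simp [pvJoin, pvShift t]

theorem pvASide (bs : List (List String)) :
    (let result := bs.foldl (fun acc g => if g ≠ [] then acc ++ g ++ [""] else acc) [];
     if result ≠ [] ∧ result.getLast? = some "" then result.dropLast else result)
      = pvJoin (bs.filter (fun g => !g.isEmpty)) := by
  simp only [pvAFold bs [], List.nil_append]
  rcases hn : bs.filter (fun g => !g.isEmpty) with _ | ⟨b, t⟩ <;> rw [hn]
  · simp [pvJoin]
  · rw [pvFlatJoin _ (by simp)]
    simp [pvJoin]

-- ---- B-side: the global sort is the concatenation of the per-group sorted blocks ----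

theorem pvSorted2Lex (xs : List (Nat × String)) :
    PySem.List.sorted2 xs (fun p => p.1) (fun p => p.2) false
      = PySem.List.sorted xs (fun p => (toLex p : Lex (Nat × String))) false := by
  show List.foldl _ [] xs = List.foldl _ [] xs
  congr 1
  funext acc x
  congr 1
  funext a b
  show (decide (a.1 < b.1) || (!decide (b.1 < a.1) && decide (a.2 < b.2)))
      = decide ((toLex a : Lex (Nat × String)) < toLex b)
  rcases Nat.lt_trichotomy a.1 b.1 with h | h | h
  · simp [Prod.Lex.lt_iff, h]
  · simp [Prod.Lex.lt_iff, h]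
  · simp [Prod.Lex.lt_iff, Nat.lt_asymm h, h, ne_of_gt h]

theorem pvPairwiseLt {l : List String} (hle : l.Pairwise (· ≤ ·)) (hnd : l.Nodup) :
    l.Pairwise (fun a b : String => a < b) :=
  (hle.and hnd).imp (fun h => lt_of_le_of_ne h.1 h.2)

theorem pvPairwiseBlocks (bs : List (Nat × List String))
    (ht : (bs.map Prod.fst).Pairwise (· < ·))
    (hb : ∀ gs ∈ bs, gs.2.Pairwise (fun a b : String => a < b)) :
    (bs.flatMap (fun gs => gs.2.map (fun i => (gs.1, i)))).Pairwise
      (fun a b => (toLex a : Lex (Nat × String)) < toLex b) := by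
  induction bs with
  | nil => simp
  | cons gs t ih =>
    rw [List.map_cons] at ht
    have hhead := (List.pairwise_cons.mp ht).1
    have htail := (List.pairwise_cons.mp ht).2
    simp only [List.flatMap_cons, List.pairwise_append]
    refine ⟨?_, ih htail (fun x hx => hb x (List.mem_cons_of_mem _ hx)), ?_⟩
    · rw [List.pairwise_map]
      exact (hb gs (List.mem_cons_self)).imp
        (fun h => by simp [Prod.Lex.lt_iff, h])
    · intro a ha b hb'
      obtain ⟨i, _, rfl⟩ := List.mem_map.mp ha
      obtain ⟨gs', hgs', hbmem⟩ := List.mem_flatMap.mp hb'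
      obtain ⟨j, _, rfl⟩ := List.mem_map.mp hbmem
      have : gs.1 < gs'.1 := hhead gs'.1 (List.mem_map_of_mem hgs')
      simp [Prod.Lex.lt_iff, this]

-- sortedness + nodup of one per-group sorted block
theorem pvBlockSorted (ds : List String) (hnd : ds.Nodup) (p : String → Bool) :
    (PySem.List.sorted (ds.filter p) (fun x => x) false).Pairwise (fun a b : String => a < b) := by
  refine pvPairwiseLt ?_ ?_
  · exact PySem.List.sorted_pairwise (ds.filter p) (fun x => x)
  · exact ((PySem.List.sorted_perm (ds.filter p) (fun x => x) false).nodup_iff).mpr (hnd.filter p)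

-- the global lex sort of the tagged pairs is the concatenation of sorted blocks
theorem pvSortedPairs (ds : List String) (hnd : ds.Nodup) :
    PySem.List.sorted2
        (pvTagged.flatMap (fun gp => (ds.filter gp.2).map (fun imp => (gp.1, imp))))
        (fun p => p.1) (fun p => p.2) false
      = (pvTagged.map (fun gp => (gp.1, PySem.List.sorted (ds.filter gp.2) (fun x => x) false))).flatMap
          (fun gs => gs.2.map (fun i => (gs.1, i))) := by
  rw [pvSorted2Lex]
  apply PySem.List.sorted_eq_of_perm_of_pairwise_lt
  · rw [List.flatMap_map]
    exact List.Perm.flatMap (List.Perm.refl _)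
      (fun gp _ => (PySem.List.sorted_perm (ds.filter gp.2) (fun x => x) false).map _)
  · apply pvPairwiseBlocks
    · simp [pvTagged]
    · intro gs hgs
      simp only [List.mem_map] at hgs
      obtain ⟨gp, _, rfl⟩ := hgs
      exact pvBlockSorted ds hnd gp.2

-- ---- B-side emit loop over a concatenation of tagged blocks ----

theorem pvStepBlockSame (s : List String) (g : Nat) (acc : List String) :
    (s.map (fun i => (g, i))).foldl pvStep (acc, some g) = (acc ++ s, some g) := by
  induction s generalizing acc with
  | nil => simp
  | cons x t ih => simp [pvStep, ih]

theorem pvFoldSome (bs : List (Nat × List String)) (acc : List String) (t : Nat)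
    (hts : t ∉ bs.map Prod.fst) (hnd : (bs.map Prod.fst).Nodup) :
    ((bs.flatMap (fun gs => gs.2.map (fun i => (gs.1, i)))).foldl pvStep (acc, some t)).1
      = acc ++ ((bs.map Prod.snd).filter (fun b => !b.isEmpty)).flatMap (fun b => "" :: b) := by
  induction bs generalizing acc t with
  | nil => simp
  | cons gs bs ih =>
    have htg : t ≠ gs.1 := by intro h; subst h; simp at hts
    have hts' : t ∉ bs.map Prod.fst := by simp at hts ⊢; exact hts.2
    have hg' : gs.1 ∉ bs.map Prod.fst := (List.nodup_cons.mp (by simpa using hnd)).1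
    have hnd' : (bs.map Prod.fst).Nodup := (List.nodup_cons.mp (by simpa using hnd)).2
    rcases hs : gs.2 with _ | ⟨x, xs⟩
    · simpa [hs] using ih acc t hts' hnd'
    · simp only [List.flatMap_cons, List.foldl_append, hs, List.map_cons, List.foldl_cons]
      have h1 : pvStep (acc, some t) (gs.1, x) = (acc ++ [""] ++ [x], some gs.1) := by
        simp [pvStep, htg]
      rw [h1, pvStepBlockSame]
      rw [ih _ gs.1 hg' hnd']
      simp

theorem pvFoldNone (bs : List (Nat × List String))
    (hnd : (bs.map Prod.fst).Nodup) :
    ((bs.flatMap (fun gs => gs.2.map (fun i => (gs.1, i)))).foldl pvStep ([], none)).1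
      = pvJoin ((bs.map Prod.snd).filter (fun b => !b.isEmpty)) := by
  induction bs with
  | nil => simp [pvJoin]
  | cons gs bs ih =>
    have hg' : gs.1 ∉ bs.map Prod.fst := (List.nodup_cons.mp (by simpa using hnd)).1
    have hnd' : (bs.map Prod.fst).Nodup := (List.nodup_cons.mp (by simpa using hnd)).2
    rcases hs : gs.2 with _ | ⟨x, xs⟩
    · simpa [hs] using ih hnd'
    · simp only [List.flatMap_cons, List.foldl_append, hs, List.map_cons, List.foldl_cons]
      have h1 : pvStep ([], none) (gs.1, x) = ([x], some gs.1) := by simp [pvStep]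
      rw [h1, pvStepBlockSame]
      rw [pvFoldSome _ _ gs.1 hg' hnd']
      simp [pvJoin]

-- ===== VERDICT (by name: the statement is the Claim_ definition above) =====
theorem sort_imports_py_spec : Claim_equal_sort_imports_py := by
  intro imports _
  dsimp only [Spec_sort_imports_py, sort_imports_py, sort_imports_py_alt]
  have hnd : (PySem.List.dedup imports).Nodup := PySem.List.nodup_dedup imports
  rw [pvSortedPairs _ hnd, pvFoldNone _ (by simp [pvTagged])]
  have := pvASide
    [ PySem.List.sorted ((PySem.List.dedup imports).filter pvP1) (fun x => x) false,
      PySem.List.sorted ((PySem.List.dedup imports).filter pvP2) (fun x => x) false,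
      PySem.List.sorted ((PySem.List.dedup imports).filter pvP3) (fun x => x) false,
      PySem.List.sorted ((PySem.List.dedup imports).filter pvP4) (fun x => x) false,
      PySem.List.sorted ((PySem.List.dedup imports).filter pvP5) (fun x => x) false,
      PySem.List.sorted ((PySem.List.dedup imports).filter pvP6) (fun x => x) false ]
  simp only [ne_eq, ← List.isEmpty_iff, Bool.not_eq_true, ← Bool.not_eq_true'] at this ⊢
  rw [this]
  simp [pvTagged]
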